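-- pv_equiv track=rewrite | github.com/Just-Semantics/PhonoLex | webapp/backend/migrations/populate_typed_edges_simple.py | find_neighbors_for_word
-- ===== SOURCE A (Python) =====
-- def levenshtein_distance(seq1, seq2):
--     """Compute edit distance between two sequences."""
--     if len(seq1) == 0:
--         return len(seq2)
--     if len(seq2) == 0:
--         return len(seq1)
--
--     # Create distance matrix
--     d = [[0] * (len(seq2) + 1) for _ in range(len(seq1) + 1)]
--
--     for i in range(len(seq1) + 1):
--         d[i][0] = i
--     for j in range(len(seq2) + 1):
--         d[0][j] = j
--
--     for i in range(1, len(seq1) + 1):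
--         for j in range(1, len(seq2) + 1):
--             cost = 0 if seq1[i-1] == seq2[j-1] else 1
--             d[i][j] = min(
--                 d[i-1][j] + 1,      # deletion
--                 d[i][j-1] + 1,      # insertion
--                 d[i-1][j-1] + cost  # substitution
--             )
--
--     return d[len(seq1)][len(seq2)]
--
-- def find_neighbors_for_word(word_data, all_words, max_distance=2):
--     """
--     Find phonological neighbors.
--
--     Neighbors have edit distance ≤ max_distance.
--     """
--     word_id, word, phonemes, syllables = word_data
--     neighbors = []
--
--     for other_id, other_word, other_phonemes, other_syllables in all_words:
--         if other_id <= word_id:  # Avoid duplicates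
--             continue
--
--         # Calculate edit distance
--         dist = levenshtein_distance(phonemes, other_phonemes)
--
--         if 0 < dist <= max_distance:
--             metadata = {
--                 'edit_distance': dist,
--                 'phoneme_diff': dist
--             }
--             neighbors.append((other_id, metadata))
--
--     return neighbors
-- ===== SOURCE B (Python) =====
-- def levenshtein_distance(seq1, seq2):
--     """Edit distance by top-down memoized recursion over prefix lengths."""
--     memo = {}
--     def rec(i, j):
--         if (i, j) in memo:
--             return memo[(i, j)]
--         if i == 0:
--             r = j
--         elif j == 0:
--             r = i
--         elif seq1[i - 1] == seq2[j - 1]: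
--             r = rec(i - 1, j - 1)
--         else:
--             r = 1 + min(rec(i - 1, j), rec(i, j - 1), rec(i - 1, j - 1))
--         memo[(i, j)] = r
--         return r
--     return rec(len(seq1), len(seq2))
--
-- def find_neighbors_for_word(word_data, all_words, max_distance=2):
--     """Find phonological neighbors (edit distance in 1..max_distance)."""
--     word_id, _word, phonemes, _syllables = word_data
--
--     def keep(entry):
--         other_id, _w, other_phonemes, _s = entry
--         if other_id <= word_id:
--             return None
--         d = levenshtein_distance(phonemes, other_phonemes)
--         if 0 < d <= max_distance:
--             return (other_id, {'edit_distance': d, 'phoneme_diff': d})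
--         return None
--
--     return [r for r in map(keep, all_words) if r is not None]
-- ===== Notes on version B (the rewrite author's own statement) =====
-- stated objective: alternative
-- what changed: levenshtein_distance's bottom-up (n+1)x(m+1) matrix DP is replaced by a top-down memoized recursion on prefix lengths (dict cache, matching characters short-circuit to the diagonal subproblem with no min), and the wrapper's append loop becomes a filter-map over all_words.
import Mathlib
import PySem

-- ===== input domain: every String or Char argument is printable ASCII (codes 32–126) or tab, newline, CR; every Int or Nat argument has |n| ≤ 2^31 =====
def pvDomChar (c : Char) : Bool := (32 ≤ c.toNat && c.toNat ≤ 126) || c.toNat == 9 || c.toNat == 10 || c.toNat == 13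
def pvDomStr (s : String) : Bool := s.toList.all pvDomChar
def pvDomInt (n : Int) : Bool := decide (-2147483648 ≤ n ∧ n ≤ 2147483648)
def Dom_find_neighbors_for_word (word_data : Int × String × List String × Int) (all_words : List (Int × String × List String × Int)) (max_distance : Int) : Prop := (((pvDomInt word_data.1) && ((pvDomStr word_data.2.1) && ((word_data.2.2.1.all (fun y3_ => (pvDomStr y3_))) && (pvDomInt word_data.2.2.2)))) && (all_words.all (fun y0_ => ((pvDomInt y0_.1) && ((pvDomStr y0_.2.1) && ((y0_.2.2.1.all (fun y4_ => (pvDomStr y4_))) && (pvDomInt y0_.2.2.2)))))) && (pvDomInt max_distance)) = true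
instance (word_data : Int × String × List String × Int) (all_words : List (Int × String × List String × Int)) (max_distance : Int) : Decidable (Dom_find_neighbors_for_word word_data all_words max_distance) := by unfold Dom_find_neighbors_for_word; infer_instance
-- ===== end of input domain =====

-- B replaces A's bottom-up (n+1)×(m+1) Levenshtein matrix DP by a top-down memoized recursion
-- on prefix lengths (dict cache; equal characters short-circuit to the diagonal subproblem),
-- and A's append loop by a filter-map over all_words; same return values (alternative decomposition).

-- ===== PORT A =====
-- levenshtein_distance: full-matrix bottom-up DP, as in Source A.
-- All matrix/sequence indices are provably in range, so getD is exact for Python's indexing here.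
def levenshteinA (seq1 seq2 : List String) : Int :=
  if seq1.length = 0 then (seq2.length : Int)
  else if seq2.length = 0 then (seq1.length : Int)
  else
    let n := seq1.length
    let m := seq2.length
    let d0 : List (List Int) := List.replicate (n+1) (List.replicate (m+1) 0)
    let d1 := (List.range (n+1)).foldl (fun d i => d.set i ((d.getD i []).set 0 (i : Int))) d0
    let d2 := (List.range (m+1)).foldl (fun d j => d.set 0 ((d.getD 0 []).set j (j : Int))) d1
    let d3 := (List.range n).foldl (fun d i' =>
      (List.range m).foldl (fun d j' =>
        let i := i' + 1
        let j := j' + 1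
        let cost : Int := if seq1.getD (i-1) "" = seq2.getD (j-1) "" then 0 else 1
        let v := min (min ((d.getD (i-1) []).getD j 0 + 1) ((d.getD i []).getD (j-1) 0 + 1))
                     ((d.getD (i-1) []).getD (j-1) 0 + cost)
        d.set i ((d.getD i []).set j v)) d) d2
    (d3.getD n []).getD m 0

def find_neighbors_for_word (word_data : Int × String × List String × Int) (all_words : List (Int × String × List String × Int)) (max_distance : Int) : List (Int × (List (String × Int))) :=
  all_words.foldl (fun neighbors e =>
    if e.1 ≤ word_data.1 then neighbors
    else
      let dist := levenshteinA word_data.2.2.1 e.2.2.1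
      if 0 < dist ∧ dist ≤ max_distance then
        neighbors ++ [(e.1, [("edit_distance", dist), ("phoneme_diff", dist)])]
      else neighbors) []

-- ===== PORT B =====
-- rec(i, j) of Source B: top-down memoized recursion; the memo dict is threaded through
-- (Python mutates the closure's dict; here it is explicit state, same lookups and stores).
-- Indices i-1, j-1 are taken only when i, j ≥ 1, so getD is exact for Python's seq[i-1].
def recM (s1 s2 : List String) (i j : Nat) (memo : PySem.Dict (Nat × Nat) Int) : Int × PySem.Dict (Nat × Nat) Int :=
  if memo.contains (i, j) then (memo.getD (i, j) 0, memo)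
  else
    let rm : Int × PySem.Dict (Nat × Nat) Int :=
      if _hi : i = 0 then ((j : Int), memo)
      else if _hj : j = 0 then ((i : Int), memo)
      else if s1.getD (i-1) "" = s2.getD (j-1) "" then recM s1 s2 (i-1) (j-1) memo
      else
        let am := recM s1 s2 (i-1) j memo
        let bm := recM s1 s2 i (j-1) am.2
        let cm := recM s1 s2 (i-1) (j-1) bm.2
        (1 + min am.1 (min bm.1 cm.1), cm.2)
    (rm.1, rm.2.insert (i, j) rm.1)
termination_by i + j
decreasing_by all_goals omega

-- levenshtein_distance of Source B: fresh memo, then rec(len(seq1), len(seq2)).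
def levB (s1 s2 : List String) : Int :=
  (recM s1 s2 s1.length s2.length PySem.Dict.empty).1

def find_neighbors_for_word_alt (word_data : Int × String × List String × Int) (all_words : List (Int × String × List String × Int)) (max_distance : Int) : List (Int × (List (String × Int))) :=
  all_words.filterMap (fun e =>
    if e.1 ≤ word_data.1 then none
    else
      let d := levB word_data.2.2.1 e.2.2.1
      if 0 < d ∧ d ≤ max_distance then
        some (e.1, [("edit_distance", d), ("phoneme_diff", d)])
      else none)

-- ===== PRECONDITION & SPEC =====
def Spec_find_neighbors_for_word (word_data : Int × String × List String × Int) (all_words : List (Int × String × List String × Int)) (max_distance : Int) (out : List (Int × (List (String × Int)))) : Prop := out = find_neighbors_for_word_alt word_data all_words max_distance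
instance (word_data : Int × String × List String × Int) (all_words : List (Int × String × List String × Int)) (max_distance : Int) (out : List (Int × (List (String × Int)))) : Decidable (Spec_find_neighbors_for_word word_data all_words max_distance out) := by unfold Spec_find_neighbors_for_word; infer_instance

-- ===== CLAIM (what is proved, stated in full; the proofs are below) =====
def Claim_equal_find_neighbors_for_word : Prop := ∀ (word_data : Int × String × List String × Int) (all_words : List (Int × String × List String × Int)) (max_distance : Int), Dom_find_neighbors_for_word word_data all_words max_distance → Spec_find_neighbors_for_word word_data all_words max_distance (find_neighbors_for_word word_data all_words max_distance)

-- ===== LEMMAS AND PROOFS =====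

-- The prefix edit-distance table: Dd s1 s2 i j = edit distance of s1[:i] and s2[:j].
def Dd (s1 s2 : List String) : Nat → Nat → Int
  | 0, j => (j : Int)
  | (i+1), 0 => (i : Int) + 1
  | (i+1), (j+1) =>
      let cost : Int := if s1.getD i "" = s2.getD j "" then 0 else 1
      min (min (Dd s1 s2 i (j+1) + 1) (Dd s1 s2 (i+1) j + 1)) (Dd s1 s2 i j + cost)
termination_by i j => i + j

lemma Dd_zero_left (s1 s2 : List String) (j : Nat) : Dd s1 s2 0 j = (j : Int) := by
  simp [Dd]

lemma Dd_zero_right (s1 s2 : List String) (i : Nat) : Dd s1 s2 i 0 = (i : Int) := by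
  cases i <;> simp [Dd]

lemma Dd_succ_succ (s1 s2 : List String) (i j : Nat) :
    Dd s1 s2 (i+1) (j+1) =
      min (min (Dd s1 s2 i (j+1) + 1) (Dd s1 s2 (i+1) j + 1))
          (Dd s1 s2 i j + (if s1.getD i "" = s2.getD j "" then (0:Int) else 1)) := by
  rw [Dd]

-- ---- generic list-set/getD facts ----
lemma getD_set_pos {α : Type} (l : List α) (i : Nat) (v dflt : α) (h : i < l.length) :
    (l.set i v).getD i dflt = v := by
  simp [List.getD, h]

lemma getD_set_neq {α : Type} (l : List α) (i j : Nat) (v dflt : α) (h : i ≠ j) :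
    (l.set i v).getD j dflt = l.getD j dflt := by
  simp [List.getD, h]

-- ---- matrix entry access and shape ----
def getE (d : List (List Int)) (r c : Nat) : Int := (d.getD r []).getD c 0

def Shape (d : List (List Int)) (n m : Nat) : Prop :=
  d.length = n + 1 ∧ ∀ row ∈ d, row.length = m + 1

lemma shape_row_len {d : List (List Int)} {n m : Nat} (h : Shape d n m) {r : Nat} (hr : r ≤ n) :
    (d.getD r []).length = m + 1 := by
  have hrl : r < d.length := by rw [h.1]; omega
  have he : d.getD r [] = d[r] := by simp [List.getD, List.getElem?_eq_getElem hrl]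
  rw [he]; exact h.2 _ (List.getElem_mem hrl)

lemma shape_set {d : List (List Int)} {n m : Nat} (h : Shape d n m) (r c : Nat) (v : Int)
    (hr : r ≤ n) : Shape (d.set r ((d.getD r []).set c v)) n m := by
  refine ⟨by simp [h.1], ?_⟩
  intro row hrow
  rcases List.mem_or_eq_of_mem_set hrow with h' | h'
  · exact h.2 _ h'
  · subst h'; simpa using shape_row_len h hr

lemma getE_set_self {d : List (List Int)} {n m : Nat} (h : Shape d n m) {r c : Nat}
    (hr : r ≤ n) (hc : c ≤ m) (v : Int) :
    getE (d.set r ((d.getD r []).set c v)) r c = v := by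
  have h1 : r < d.length := by rw [h.1]; omega
  have h2 : c < (d.getD r []).length := by rw [shape_row_len h hr]; omega
  unfold getE
  rw [getD_set_pos _ _ _ _ h1, getD_set_pos _ _ _ _ h2]

lemma getE_set_other {d : List (List Int)} (r c r' c' : Nat) (v : Int)
    (hr : r < d.length) (h : r' ≠ r ∨ c' ≠ c) :
    getE (d.set r ((d.getD r []).set c v)) r' c' = getE d r' c' := by
  unfold getE
  by_cases hrr : r' = r
  · subst hrr
    have hcc : c' ≠ c := h.resolve_left (by simp)
    rw [getD_set_pos _ _ _ _ hr, getD_set_neq _ _ _ _ _ (Ne.symm hcc)]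
  · rw [getD_set_neq _ _ _ _ _ (fun e => hrr e.symm)]

-- ---- the phases of A's matrix pipeline, parameterised by how many loop steps have run ----
def mat0 (n m : Nat) : List (List Int) := List.replicate (n+1) (List.replicate (m+1) 0)

def mat1p (n m k : Nat) : List (List Int) :=
  (List.range k).foldl (fun d i => d.set i ((d.getD i []).set 0 (i : Int))) (mat0 n m)

def mat2p (n m k : Nat) : List (List Int) :=
  (List.range k).foldl (fun d j => d.set 0 ((d.getD 0 []).set j (j : Int))) (mat1p n m (n+1))

def innerp (s1 s2 : List String) (i' : Nat) (d : List (List Int)) (t : Nat) : List (List Int) :=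
  (List.range t).foldl (fun d j' =>
    let i := i' + 1
    let j := j' + 1
    let cost : Int := if s1.getD (i-1) "" = s2.getD (j-1) "" then 0 else 1
    let v := min (min ((d.getD (i-1) []).getD j 0 + 1) ((d.getD i []).getD (j-1) 0 + 1))
                 ((d.getD (i-1) []).getD (j-1) 0 + cost)
    d.set i ((d.getD i []).set j v)) d

def mat3p (s1 s2 : List String) (k : Nat) : List (List Int) :=
  (List.range k).foldl (fun d i' => innerp s1 s2 i' d s2.length)
    (mat2p s1.length s2.length (s2.length + 1))

lemma levenshteinA_char (s1 s2 : List String) (h1 : ¬ s1.length = 0) (h2 : ¬ s2.length = 0) :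
    levenshteinA s1 s2 = getE (mat3p s1 s2 s1.length) s1.length s2.length := by
  unfold levenshteinA
  rw [if_neg h1, if_neg h2]
  rfl

lemma shape_mat0 (n m : Nat) : Shape (mat0 n m) n m := by
  refine ⟨by simp [mat0], ?_⟩
  intro row hrow
  have := List.eq_of_mem_replicate hrow
  simp [this]

lemma getE_mat0 (n m : Nat) {r c : Nat} (hr : r ≤ n) (hc : c ≤ m) : getE (mat0 n m) r c = 0 := by
  unfold getE mat0
  have h1 : r < n + 1 := by omega
  have h2 : c < m + 1 := by omega
  simp [List.getD, h1, h2]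

lemma phase1 (n m : Nat) : ∀ k, k ≤ n + 1 →
    Shape (mat1p n m k) n m ∧
    ∀ r c, r ≤ n → c ≤ m →
      getE (mat1p n m k) r c = if r < k ∧ c = 0 then (r : Int) else 0 := by
  intro k
  induction k with
  | zero =>
    intro _
    refine ⟨by simpa [mat1p] using shape_mat0 n m, ?_⟩
    intro r c hr hc
    simp [mat1p, getE_mat0 n m hr hc]
  | succ k ih =>
    intro hk
    obtain ⟨sh, vals⟩ := ih (by omega)
    have hstep : mat1p n m (k+1) =
        (mat1p n m k).set k (((mat1p n m k).getD k []).set 0 (k : Int)) := by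
      simp [mat1p, List.range_succ]
    have hkn : k ≤ n := by omega
    refine ⟨hstep ▸ shape_set sh k 0 _ hkn, ?_⟩
    intro r c hr hc
    rw [hstep]
    by_cases hrc : r = k ∧ c = 0
    · obtain ⟨h1', h2'⟩ := hrc; subst h1'; subst h2'
      rw [getE_set_self sh hkn (by omega)]
      simp
    · have hne : r ≠ k ∨ c ≠ 0 := by tauto
      rw [getE_set_other _ _ _ _ _ (by rw [sh.1]; omega) hne, vals r c hr hc]
      have heq : (r < k + 1 ∧ c = 0) ↔ (r < k ∧ c = 0) := by
        rcases hne with h'' | h'' <;> constructor <;> intro h3 <;>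
          exact ⟨by omega, h3.2⟩
      simp only [heq]

lemma phase2 (n m : Nat) : ∀ k, k ≤ m + 1 →
    Shape (mat2p n m k) n m ∧
    ∀ r c, r ≤ n → c ≤ m →
      getE (mat2p n m k) r c =
        if r = 0 then (if c < k then (c : Int) else 0) else if c = 0 then (r : Int) else 0 := by
  intro k
  induction k with
  | zero =>
    intro _
    obtain ⟨sh, vals⟩ := phase1 n m (n+1) (le_refl _)
    refine ⟨by simpa [mat2p] using sh, ?_⟩
    intro r c hr hc
    have hvv := vals r c hr hc
    simp only [mat2p, List.range_zero, List.foldl_nil]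
    rw [hvv]
    split_ifs <;> first | rfl | omega
  | succ k ih =>
    intro hk
    obtain ⟨sh, vals⟩ := ih (by omega)
    have hstep : mat2p n m (k+1) =
        (mat2p n m k).set 0 (((mat2p n m k).getD 0 []).set k (k : Int)) := by
      simp [mat2p, List.range_succ]
    refine ⟨hstep ▸ shape_set sh 0 k _ (by omega), ?_⟩
    intro r c hr hc
    rw [hstep]
    by_cases hrc : r = 0 ∧ c = k
    · obtain ⟨h1', h2'⟩ := hrc; subst h1'; subst h2'
      rw [getE_set_self sh (by omega) (by omega)]
      simp
    · have hne : r ≠ 0 ∨ c ≠ k := by tauto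
      rw [getE_set_other _ _ _ _ _ (by rw [sh.1]; omega) hne, vals r c hr hc]
      split_ifs <;> first | rfl | omega

lemma inner_inv (s1 s2 : List String) (k : Nat) (hk : k < s1.length) (d : List (List Int))
    (hd : Shape d s1.length s2.length)
    (hval : ∀ r c, r ≤ s1.length → c ≤ s2.length →
      getE d r c = if r ≤ k then Dd s1 s2 r c else if c = 0 then (r : Int) else 0) :
    ∀ t, t ≤ s2.length →
      Shape (innerp s1 s2 k d t) s1.length s2.length ∧
      ∀ r c, r ≤ s1.length → c ≤ s2.length →
        getE (innerp s1 s2 k d t) r c =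
          if r ≤ k then Dd s1 s2 r c
          else if r = k + 1 ∧ c ≤ t then Dd s1 s2 r c
          else if c = 0 then (r : Int) else 0 := by
  intro t
  induction t with
  | zero =>
    intro _
    refine ⟨by simpa [innerp] using hd, ?_⟩
    intro r c hr hc
    simp only [innerp, List.range_zero, List.foldl_nil]
    rw [hval r c hr hc]
    by_cases h1 : r ≤ k
    · simp [h1]
    · simp only [if_neg h1]
      by_cases h2 : r = k + 1 ∧ c ≤ 0
      · obtain ⟨e1, e2⟩ := h2
        have e2' : c = 0 := by omega
        subst e1; subst e2'
        simp [Dd_zero_right]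
      · rw [if_neg h2]
  | succ t ih =>
    intro ht
    obtain ⟨sh, vals⟩ := ih (by omega)
    have hcost :
        innerp s1 s2 k d (t+1) =
          (innerp s1 s2 k d t).set (k+1) (((innerp s1 s2 k d t).getD (k+1) []).set (t+1)
            (min (min (((innerp s1 s2 k d t).getD k []).getD (t+1) 0 + 1)
                      (((innerp s1 s2 k d t).getD (k+1) []).getD t 0 + 1))
                 (((innerp s1 s2 k d t).getD k []).getD t 0 +
                   (if s1.getD k "" = s2.getD t "" then (0:Int) else 1)))) := by
      simp only [innerp, List.range_succ, List.foldl_append, List.foldl_cons, List.foldl_nil,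
        Nat.add_sub_cancel]
    set e := innerp s1 s2 k d t with he
    have hup : getE e k (t+1) = Dd s1 s2 k (t+1) := by
      rw [vals k (t+1) (by omega) (by omega)]; simp
    have hleft : getE e (k+1) t = Dd s1 s2 (k+1) t := by
      rw [vals (k+1) t (by omega) (by omega)]
      simp
    have hdiag : getE e k t = Dd s1 s2 k t := by
      rw [vals k t (by omega) (by omega)]; simp
    have hv :
        (min (min ((e.getD k []).getD (t+1) 0 + 1) ((e.getD (k+1) []).getD t 0 + 1))
             ((e.getD k []).getD t 0 + (if s1.getD k "" = s2.getD t "" then (0:Int) else 1)))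
          = Dd s1 s2 (k+1) (t+1) := by
      show (min (min (getE e k (t+1) + 1) (getE e (k+1) t + 1))
             (getE e k t + (if s1.getD k "" = s2.getD t "" then (0:Int) else 1))) = _
      rw [hup, hleft, hdiag, Dd_succ_succ]
    rw [hcost, hv]
    refine ⟨shape_set sh (k+1) (t+1) _ (by omega), ?_⟩
    intro r c hr hc
    by_cases hrc : r = k + 1 ∧ c = t + 1
    · obtain ⟨e1, e2⟩ := hrc; subst e1; subst e2
      rw [getE_set_self sh (by omega) (by omega)]
      simp
    · have hne : r ≠ k + 1 ∨ c ≠ t + 1 := by tauto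
      rw [getE_set_other _ _ _ _ _ (by rw [sh.1]; omega) hne, vals r c hr hc]
      by_cases h1 : r ≤ k
      · simp [h1]
      · simp only [if_neg h1]
        by_cases h2 : r = k + 1
        · subst h2
          have hc' : c ≠ t + 1 := by tauto
          have heq : (c ≤ t + 1) ↔ (c ≤ t) := by omega
          simp [heq]
        · simp [h2]

lemma outer_inv (s1 s2 : List String) : ∀ k, k ≤ s1.length →
    Shape (mat3p s1 s2 k) s1.length s2.length ∧
    ∀ r c, r ≤ s1.length → c ≤ s2.length →
      getE (mat3p s1 s2 k) r c =
        if r ≤ k then Dd s1 s2 r c else if c = 0 then (r : Int) else 0 := by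
  intro k
  induction k with
  | zero =>
    intro _
    obtain ⟨sh, vals⟩ := phase2 s1.length s2.length (s2.length + 1) (le_refl _)
    refine ⟨by simpa [mat3p] using sh, ?_⟩
    intro r c hr hc
    have hvv := vals r c hr hc
    simp only [mat3p, List.range_zero, List.foldl_nil]
    rw [hvv]
    by_cases h1 : r = 0
    · subst h1
      have hcm : c < s2.length + 1 := by omega
      simp [Dd_zero_left, hcm]
    · have h2 : ¬ r ≤ 0 := by omega
      simp [h1, h2]
  | succ k ih =>
    intro hk
    obtain ⟨sh, vals⟩ := ih (by omega)
    have hstep : mat3p s1 s2 (k+1) = innerp s1 s2 k (mat3p s1 s2 k) s2.length := by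
      simp only [mat3p, List.range_succ, List.foldl_append, List.foldl_cons, List.foldl_nil,
        innerp]
    obtain ⟨sh', vals'⟩ :=
      inner_inv s1 s2 k (by omega) (mat3p s1 s2 k) sh vals s2.length (le_refl _)
    refine ⟨hstep ▸ sh', ?_⟩
    intro r c hr hc
    rw [hstep, vals' r c hr hc]
    by_cases h1 : r ≤ k
    · have h1' : r ≤ k + 1 := by omega
      simp [h1, h1']
    · by_cases h2 : r = k + 1
      · subst h2; simp [h1, hc]
      · have h3 : ¬ r ≤ k + 1 := by omega
        simp [h1, h2, h3]

lemma levA_eq_Dd (s1 s2 : List String) :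
    levenshteinA s1 s2 = Dd s1 s2 s1.length s2.length := by
  by_cases h1 : s1.length = 0
  · rw [h1, Dd_zero_left]
    unfold levenshteinA
    rw [if_pos h1]
  · by_cases h2 : s2.length = 0
    · rw [h2, Dd_zero_right]
      unfold levenshteinA
      rw [if_neg h1, if_pos h2]
    · rw [levenshteinA_char s1 s2 h1 h2]
      obtain ⟨_, vals⟩ := outer_inv s1 s2 s1.length (le_refl _)
      rw [vals s1.length s2.length (le_refl _) (le_refl _)]
      simp

-- ---- B side: the memoized recursion computes Dd ----

-- Dd moves by at most 1 when one prefix grows by one element.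
lemma Dd_bounds (s1 s2 : List String) : ∀ n i j, i + j ≤ n →
    Dd s1 s2 i j ≤ Dd s1 s2 i (j+1) + 1 ∧ Dd s1 s2 i j ≤ Dd s1 s2 (i+1) j + 1 := by
  intro n
  induction n with
  | zero =>
    intro i j h
    have hi : i = 0 := by omega
    have hj : j = 0 := by omega
    subst hi; subst hj
    rw [Dd_zero_left, Dd_zero_left, Dd_zero_right]
    omega
  | succ n ih =>
    intro i j h
    match i, j with
    | 0, j =>
      constructor
      · rw [Dd_zero_left, Dd_zero_left]; push_cast; omega
      · match j with
        | 0 => rw [Dd_zero_left, Dd_zero_right]; omega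
        | (j'+1) =>
          rw [Dd_zero_left, Dd_succ_succ]
          have hih := (ih 0 j' (by omega)).2
          rw [Dd_zero_left, Dd_zero_left] at *
          have hc : (0:Int) ≤ (if s1.getD 0 "" = s2.getD j' "" then (0:Int) else 1) := by
            split <;> norm_num
          push_cast at *
          omega
    | (i'+1), 0 =>
      constructor
      · rw [Dd_zero_right, Dd_succ_succ]
        have hih := (ih i' 0 (by omega)).1
        rw [Dd_zero_right, Dd_zero_right] at *
        have hc : (0:Int) ≤ (if s1.getD i' "" = s2.getD 0 "" then (0:Int) else 1) := by
          split <;> norm_num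
        push_cast at *
        omega
      · rw [Dd_zero_right, Dd_zero_right]; push_cast; omega
    | (i'+1), (j'+1) =>
      have harm1 : Dd s1 s2 (i'+1) (j'+1) ≤ Dd s1 s2 i' (j'+1) + 1 := by
        rw [Dd_succ_succ]
        have := min_le_left (min (Dd s1 s2 i' (j'+1) + 1) (Dd s1 s2 (i'+1) j' + 1))
          (Dd s1 s2 i' j' + (if s1.getD i' "" = s2.getD j' "" then (0:Int) else 1))
        omega
      have harm2 : Dd s1 s2 (i'+1) (j'+1) ≤ Dd s1 s2 (i'+1) j' + 1 := by
        rw [Dd_succ_succ]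
        have := min_le_left (min (Dd s1 s2 i' (j'+1) + 1) (Dd s1 s2 (i'+1) j' + 1))
          (Dd s1 s2 i' j' + (if s1.getD i' "" = s2.getD j' "" then (0:Int) else 1))
        omega
      constructor
      · rw [Dd_succ_succ s1 s2 i' (j'+1)]
        have hih := (ih i' (j'+1) (by omega)).1
        have hc : (0:Int) ≤ (if s1.getD i' "" = s2.getD (j'+1) "" then (0:Int) else 1) := by
          split <;> norm_num
        omega
      · rw [Dd_succ_succ s1 s2 (i'+1) j']
        have hih := (ih (i'+1) j' (by omega)).2
        have hc : (0:Int) ≤ (if s1.getD (i'+1) "" = s2.getD j' "" then (0:Int) else 1) := by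
          split <;> norm_num
        omega

-- matching characters: the recurrence collapses to the diagonal subproblem.
lemma Dd_diag_of_eq (s1 s2 : List String) (i j : Nat) (h : s1.getD i "" = s2.getD j "") :
    Dd s1 s2 (i+1) (j+1) = Dd s1 s2 i j := by
  rw [Dd_succ_succ, if_pos h]
  have h1 := (Dd_bounds s1 s2 (i + j) i j (le_refl _)).1
  have h2 := (Dd_bounds s1 s2 (i + j) i j (le_refl _)).2
  omega

-- memo correctness: every stored value is the true prefix distance.
def MemoOK (s1 s2 : List String) (m : PySem.Dict (Nat × Nat) Int) : Prop :=
  ∀ p v, m.get? p = some v → v = Dd s1 s2 p.1 p.2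

lemma memoOK_empty (s1 s2 : List String) : MemoOK s1 s2 PySem.Dict.empty := by
  intro p v h
  simp [PySem.Dict.get?_empty] at h

lemma memoOK_insert (s1 s2 : List String) (m : PySem.Dict (Nat × Nat) Int)
    (hm : MemoOK s1 s2 m) (i j : Nat) (r : Int) (hr : r = Dd s1 s2 i j) :
    MemoOK s1 s2 (m.insert (i, j) r) := by
  intro p v h
  rw [PySem.Dict.get?_insert] at h
  by_cases hp : p = (i, j)
  · rw [if_pos hp] at h
    cases h
    subst hp
    exact hr
  · rw [if_neg hp] at h
    exact hm p v h

lemma recM_spec (s1 s2 : List String) : ∀ n i j memo, i + j ≤ n → MemoOK s1 s2 memo →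
    (recM s1 s2 i j memo).1 = Dd s1 s2 i j ∧ MemoOK s1 s2 (recM s1 s2 i j memo).2 := by
  intro n
  induction n using Nat.strong_induction_on with
  | _ n ih =>
  intro i j memo h hm
  rw [recM]
  by_cases hc : memo.contains (i, j) = true
  · rw [if_pos hc]
    have hs : (memo.get? (i, j)).isSome = true := by
      rw [← PySem.Dict.contains_eq_isSome_get?]; exact hc
    obtain ⟨v, hv⟩ := Option.isSome_iff_exists.mp hs
    refine ⟨?_, hm⟩
    show memo.getD (i, j) 0 = _
    rw [PySem.Dict.getD_eq_get?_getD, hv]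
    exact hm (i, j) v hv
  · rw [if_neg hc]
    by_cases hi : i = 0
    · subst hi
      simp only [dif_pos]
      exact ⟨by rw [Dd_zero_left], memoOK_insert _ _ _ hm 0 j _ (by rw [Dd_zero_left])⟩
    · by_cases hj : j = 0
      · subst hj
        simp only [dif_neg hi, dif_pos]
        exact ⟨by rw [Dd_zero_right], memoOK_insert _ _ _ hm i 0 _ (by rw [Dd_zero_right])⟩
      · obtain ⟨i', rfl⟩ : ∃ i', i = i' + 1 := ⟨i - 1, by omega⟩
        obtain ⟨j', rfl⟩ : ∃ j', j = j' + 1 := ⟨j - 1, by omega⟩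
        by_cases heq : s1.getD (i' + 1 - 1) "" = s2.getD (j' + 1 - 1) ""
        · simp only [dif_neg hi, dif_neg hj, if_pos heq]
          simp only [Nat.add_sub_cancel] at heq ⊢
          have hrec := ih (i' + j' + 1) (by omega) i' j' memo (by omega) hm
          have hval : (recM s1 s2 i' j' memo).1 = Dd s1 s2 (i'+1) (j'+1) := by
            rw [hrec.1, Dd_diag_of_eq s1 s2 i' j' heq]
          exact ⟨hval, memoOK_insert _ _ _ hrec.2 (i'+1) (j'+1) _ hval⟩
        · simp only [dif_neg hi, dif_neg hj, if_neg heq]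
          simp only [Nat.add_sub_cancel] at heq ⊢
          have ih' := ih (i' + j' + 1) (by omega)
          have h1 := ih' i' (j'+1) memo (by omega) hm
          have h2 := ih' (i'+1) j' (recM s1 s2 i' (j'+1) memo).2 (by omega) h1.2
          have h3 := ih' i' j' (recM s1 s2 (i'+1) j' (recM s1 s2 i' (j'+1) memo).2).2 (by omega) h2.2
          have hval : 1 + min (recM s1 s2 i' (j'+1) memo).1
              (min (recM s1 s2 (i'+1) j' (recM s1 s2 i' (j'+1) memo).2).1
                   (recM s1 s2 i' j' (recM s1 s2 (i'+1) j' (recM s1 s2 i' (j'+1) memo).2).2).1)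
              = Dd s1 s2 (i'+1) (j'+1) := by
            rw [h1.1, h2.1, h3.1, Dd_succ_succ, if_neg heq]
            omega
          exact ⟨hval, memoOK_insert _ _ _ h3.2 (i'+1) (j'+1) _ hval⟩

lemma levB_eq_Dd (s1 s2 : List String) :
    levB s1 s2 = Dd s1 s2 s1.length s2.length := by
  exact (recM_spec s1 s2 (s1.length + s2.length) s1.length s2.length PySem.Dict.empty
    (le_refl _) (memoOK_empty s1 s2)).1

lemma lev_eq (s1 s2 : List String) : levenshteinA s1 s2 = levB s1 s2 := by
  rw [levA_eq_Dd, levB_eq_Dd]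

-- ===== VERDICT (by name: the statement is the Claim_ definition above) =====
theorem find_neighbors_for_word_spec : Claim_equal_find_neighbors_for_word := by
  intro wd aw md _
  unfold Spec_find_neighbors_for_word find_neighbors_for_word find_neighbors_for_word_alt
  have key : ∀ (l : List (Int × String × List String × Int)) (acc : List (Int × List (String × Int))),
      List.foldl (fun neighbors e =>
        if e.1 ≤ wd.1 then neighbors
        else
          let dist := levenshteinA wd.2.2.1 e.2.2.1
          if 0 < dist ∧ dist ≤ md then
            neighbors ++ [(e.1, [("edit_distance", dist), ("phoneme_diff", dist)])]
          else neighbors) acc l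
      = acc ++ l.filterMap (fun e =>
          if e.1 ≤ wd.1 then none
          else
            let d := levB wd.2.2.1 e.2.2.1
            if 0 < d ∧ d ≤ md then
              some (e.1, [("edit_distance", d), ("phoneme_diff", d)])
            else none) := by
    intro l
    induction l with
    | nil => intro acc; simp
    | cons e t iht =>
      intro acc
      simp only [lev_eq] at iht
      simp only [List.foldl_cons, List.filterMap_cons, lev_eq]
      by_cases h1 : e.1 ≤ wd.1
      · simp only [if_pos h1]
        rw [iht]
      · by_cases h2 : 0 < levB wd.2.2.1 e.2.2.1 ∧ levB wd.2.2.1 e.2.2.1 ≤ md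
        · simp only [if_neg h1, if_pos h2]
          rw [iht]
          simp
        · simp only [if_neg h1, if_neg h2]
          rw [iht]
  simpa using key aw []
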